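-- pv_equiv track=rewrite | github.com/ameesh-shah/cycler | utls/utls.py | merge_parenthesis
-- ===== SOURCE A (Python) =====
-- def merge_parenthesis(lst):
--     fixed, acc = [], []
--     total = 0
--     for x in lst:
--         net = x.count('(') - x.count(')')
--         total += net
--         acc.append(x)
--
--         if total == 0:
--             fixed.append(' & '.join(acc))
--             acc = []
--
--     return fixed
-- ===== SOURCE B (Python) =====
-- def merge_parenthesis(lst):
--     # pass 1: record every index where the running paren balance returns to zero
--     bal = 0
--     bounds = []
--     for i, x in enumerate(lst):
--         bal += x.count('(') - x.count(')')
--         if bal == 0: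
--             bounds.append(i)
--     # pass 2: slice the list at those boundaries and join each segment
--     out = []
--     prev = 0
--     for b in bounds:
--         out.append(' & '.join(lst[prev:b + 1]))
--         prev = b + 1
--     return out
-- ===== Notes on version B (the rewrite author's own statement) =====
-- stated objective: alternative
-- what changed: A flushes a growing accumulator whenever a running paren balance hits zero in one loop; B makes two passes: first record every index where the prefix balance is zero, then slice the list between consecutive boundaries and join each slice.
import Mathlib
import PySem

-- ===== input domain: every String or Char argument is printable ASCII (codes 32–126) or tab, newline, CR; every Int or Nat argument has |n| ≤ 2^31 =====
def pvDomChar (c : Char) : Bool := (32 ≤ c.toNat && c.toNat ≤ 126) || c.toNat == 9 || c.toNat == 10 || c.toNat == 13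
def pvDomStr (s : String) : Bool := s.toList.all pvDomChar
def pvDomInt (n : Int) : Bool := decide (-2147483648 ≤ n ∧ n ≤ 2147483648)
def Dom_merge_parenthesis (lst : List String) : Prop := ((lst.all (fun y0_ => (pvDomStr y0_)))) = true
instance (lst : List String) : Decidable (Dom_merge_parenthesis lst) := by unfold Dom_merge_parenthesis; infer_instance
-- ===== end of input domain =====

-- B replaces A's single flush-on-zero accumulator loop by two passes (record zero-balance
-- boundary indices, then slice-and-join between consecutive boundaries); objective: alternative decomposition.

-- net = x.count('(') - x.count(')')  (used by both programs)
def pvNet (x : String) : Int := (PySem.Str.count x "(" : Int) - (PySem.Str.count x ")" : Int)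

-- ===== PORT A =====
-- the for-loop of A, state (fixed, acc, total)
def mpA_loop (lst fixed acc : List String) (total : Int) : List String :=
  match lst with
  | [] => fixed
  | x :: rest =>
    let total' := total + pvNet x
    let acc' := acc ++ [x]
    if total' = 0 then mpA_loop rest (fixed ++ [PySem.Str.join " & " acc']) [] total'
    else mpA_loop rest fixed acc' total'

def merge_parenthesis (lst : List String) : List String :=
  mpA_loop lst [] [] 0

-- ===== PORT B =====
-- pass-1 body of Source B: state (bal, bounds), one enumerated item
def mpB_step1 (st : Int × List Int) (ix : Int × String) : Int × List Int :=
  let bal := st.1 + pvNet ix.2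
  (bal, if bal = 0 then st.2 ++ [ix.1] else st.2)

-- pass-2 body of Source B: state (out, prev), one boundary b: join lst[prev:b+1]
def mpB_step2 (lst : List String) (st : List String × Int) (b : Int) : List String × Int :=
  (st.1 ++ [PySem.Str.join " & " (PySem.List.slice lst (some st.2) (some (b + 1)))], b + 1)

def merge_parenthesis_alt (lst : List String) : List String :=
  let bounds := ((PySem.List.enumerate lst 0).foldl mpB_step1 (0, [])).2
  (bounds.foldl (mpB_step2 lst) ([], 0)).1

-- ===== PRECONDITION & SPEC =====
def Spec_merge_parenthesis (lst : List String) (out : List String) : Prop := out = merge_parenthesis_alt lst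
instance (lst : List String) (out : List String) : Decidable (Spec_merge_parenthesis lst out) := by unfold Spec_merge_parenthesis; infer_instance

-- ===== CLAIM (what is proved, stated in full; the proofs are below) =====
def Claim_equal_merge_parenthesis : Prop := ∀ (lst : List String), Dom_merge_parenthesis lst → Spec_merge_parenthesis lst (merge_parenthesis lst)

-- ===== LEMMAS AND PROOFS =====

-- cons-style view of B's first pass
def pvBounds (lst : List String) (i bal : Int) : List Int :=
  match lst with
  | [] => []
  | x :: rest =>
    let bal' := bal + pvNet x
    if bal' = 0 then i :: pvBounds rest (i + 1) bal' else pvBounds rest (i + 1) bal'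

-- cons-style view of B's second pass
def pvSeg (full : List String) (bounds : List Int) (prev : Int) : List String :=
  match bounds with
  | [] => []
  | b :: bs => PySem.Str.join " & " (PySem.List.slice full (some prev) (some (b + 1))) :: pvSeg full bs (b + 1)

def pvNetSum (acc : List String) : Int := (acc.map pvNet).sum

theorem pvBounds_fold (lst : List String) :
    ∀ (i bal : Int) (acc : List Int),
    ((PySem.List.enumerate lst i).foldl mpB_step1 (bal, acc)).2 = acc ++ pvBounds lst i bal := by
  induction lst with
  | nil => intro i bal acc; simp [PySem.List.enumerate_nil, pvBounds]
  | cons x rest ih =>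
    intro i bal acc
    rw [PySem.List.enumerate_cons, List.foldl_cons]
    simp only [mpB_step1, pvBounds]
    by_cases h : bal + pvNet x = 0
    · simp only [h, ih]
      simp
    · simp only [if_neg h, ih]

theorem pvSeg_fold (full : List String) (bounds : List Int) :
    ∀ (out : List String) (prev : Int),
    (bounds.foldl (mpB_step2 full) (out, prev)).1 = out ++ pvSeg full bounds prev := by
  induction bounds with
  | nil => intro out prev; simp [pvSeg]
  | cons b bs ih => intro out prev; simp [mpB_step2, pvSeg, ih]

theorem mpA_loop_fixed (lst : List String) :
    ∀ (fixed acc : List String) (total : Int),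
    mpA_loop lst fixed acc total = fixed ++ mpA_loop lst [] acc total := by
  induction lst with
  | nil => intro fixed acc total; simp [mpA_loop]
  | cons x rest ih =>
    intro fixed acc total
    simp only [mpA_loop]
    by_cases h : total + pvNet x = 0
    · simp only [h]
      rw [ih (fixed ++ [_]), ih ([] ++ [_])]
      try simp
    · simp only [if_neg h]
      rw [ih fixed, ih []]
      try simp

theorem pvMain (lst : List String) :
    ∀ (pre acc : List String),
    pvSeg (pre ++ (acc ++ lst)) (pvBounds lst ((pre.length : Int) + (acc.length : Int)) (pvNetSum acc)) (pre.length : Int)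
      = mpA_loop lst [] acc (pvNetSum acc) := by
  induction lst with
  | nil => intro pre acc; simp [pvBounds, pvSeg, mpA_loop]
  | cons x rest ih =>
    intro pre acc
    simp only [pvBounds, mpA_loop]
    by_cases h : pvNetSum acc + pvNet x = 0
    · simp only [if_pos h, pvSeg]
      rw [h]
      have hslice : PySem.List.slice (pre ++ (acc ++ x :: rest)) (some (pre.length : Int))
          (some (((pre.length : Int) + (acc.length : Int)) + 1))
          = acc ++ [x] := by
        have hcast : ((pre.length : Int) + (acc.length : Int)) + 1 = ((pre.length + (acc.length + 1) : Nat) : Int) := by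
          push_cast; ring
        rw [hcast, PySem.List.slice_natCast]
        have hd : (pre ++ (acc ++ x :: rest)).drop pre.length = acc ++ x :: rest := by
          simp
        rw [hd]
        have ht : pre.length + (acc.length + 1) - pre.length = acc.length + 1 := by omega
        rw [ht]
        rw [List.take_append]
        simp
      rw [hslice, mpA_loop_fixed]
      simp only [List.nil_append, List.singleton_append]
      congr 1
      have h0 : pvNetSum ([] : List String) = 0 := by simp [pvNetSum]
      have hih := ih (pre ++ acc ++ [x]) []
      rw [h0] at hih
      have hlen : (((pre ++ acc ++ [x]).length : Nat) : Int) = (pre.length : Int) + (acc.length : Int) + 1 := by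
        simp; ring
      rw [hlen] at hih
      simp only [List.nil_append, List.append_assoc, List.length_nil,
        Nat.cast_zero, add_zero, List.singleton_append] at hih ⊢
      exact hih
    · simp only [if_neg h]
      have hsum : pvNetSum (acc ++ [x]) = pvNetSum acc + pvNet x := by
        simp [pvNetSum]
      have hih := ih pre (acc ++ [x])
      rw [hsum] at hih
      have hlen : ((((acc ++ [x]).length : Nat)) : Int) = (acc.length : Int) + 1 := by
        simp
      rw [hlen] at hih
      have hassoc : pre ++ (acc ++ [x] ++ rest) = pre ++ (acc ++ x :: rest) := by simp
      rw [hassoc] at hih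
      have hadd : (pre.length : Int) + ((acc.length : Int) + 1) = ((pre.length : Int) + (acc.length : Int)) + 1 := by ring
      rw [hadd] at hih
      exact hih

-- ===== VERDICT (by name: the statement is the Claim_ definition above) =====
theorem merge_parenthesis_spec : Claim_equal_merge_parenthesis := by
  intro lst _
  unfold Spec_merge_parenthesis merge_parenthesis
  simp only [merge_parenthesis_alt]
  rw [pvBounds_fold, pvSeg_fold]
  have hm := pvMain lst [] []
  simp only [pvNetSum, List.map_nil, List.sum_nil, List.nil_append, List.length_nil,
    Nat.cast_zero, add_zero] at hm
  simpa using hm.symm
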